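-- pv_equiv track=rewrite | github.com/souten-yd/CodeAgentPersonal | scripts/run_debug_test_matrix.py | _error_summary
-- ===== SOURCE A (Python) =====
-- from typing import Any
--
-- def _markdown_cell(value: Any, *, limit: int = 220) -> str:
--     text = str(value or "").replace("\r", " ").replace("\n", " ").strip()
--     text = text.replace("|", "\\|")
--     if len(text) > limit:
--         text = text[: limit - 1].rstrip() + "…"
--     return text
--
-- def _error_summary(stdout: str, stderr: str, status: str) -> str:
--     raw_lines = f"{stderr}\n{stdout}".splitlines()
--     combined_lines = [line.rstrip() for line in raw_lines if line.strip()]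
--     for idx, line in enumerate(raw_lines):
--         stripped = line.strip()
--         if stripped.startswith("FAIL: ") or stripped.startswith("ERROR: "):
--             snippet = raw_lines[idx:idx + 8]
--             return _markdown_cell("\n".join(snippet), limit=800)
--     for idx, line in enumerate(raw_lines):
--         if "AssertionError" in line:
--             lo = max(0, idx - 2)
--             hi = min(len(raw_lines), idx + 3)
--             return _markdown_cell("\n".join(raw_lines[lo:hi]), limit=800)
--     for idx, line in enumerate(raw_lines):
--         if line.strip().startswith("Traceback"):
--             hi = min(len(raw_lines), idx + 10)
--             return _markdown_cell("\n".join(raw_lines[idx:hi]), limit=800)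
--     priority_markers = ("TimeoutError", "Error:", "FAIL", "Traceback", "SMOKE_STATUS")
--     for line in reversed(combined_lines):
--         if any(marker in line for marker in priority_markers):
--             return _markdown_cell(line, limit=300)
--     if status == "passed":
--         return ""
--     return _markdown_cell(combined_lines[-1] if combined_lines else status, limit=300)
-- ===== SOURCE B (Python) =====
-- def _markdown_cell(value, *, limit=220):
--     text = str(value or "").replace("\r", " ").replace("\n", " ").strip()
--     text = text.replace("|", "\\|")
--     if len(text) > limit:
--         text = text[: limit - 1].rstrip() + "…"
--     return text
--
--
-- _PRIORITY_MARKERS = ("TimeoutError", "Error:", "FAIL", "Traceback", "SMOKE_STATUS")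
--
--
-- def _error_summary(stdout: str, stderr: str, status: str) -> str:
--     raw_lines = f"{stderr}\n{stdout}".splitlines()
--     # ONE forward pass: first FAIL/ERROR index, first AssertionError index,
--     # first Traceback index, last non-empty (rstripped) line, and the last
--     # non-empty line containing a priority marker.
--     fail_i = assert_i = tb_i = None
--     last_marker = last_line = None
--     for idx, line in enumerate(raw_lines):
--         stripped = line.strip()
--         if fail_i is None and (stripped.startswith("FAIL: ") or stripped.startswith("ERROR: ")):
--             fail_i = idx
--         if assert_i is None and "AssertionError" in line:
--             assert_i = idx
--         if tb_i is None and stripped.startswith("Traceback"):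
--             tb_i = idx
--         if stripped:
--             r = line.rstrip()
--             last_line = r
--             if any(marker in r for marker in _PRIORITY_MARKERS):
--                 last_marker = r
--     if fail_i is not None:
--         return _markdown_cell("\n".join(raw_lines[fail_i:fail_i + 8]), limit=800)
--     if assert_i is not None:
--         return _markdown_cell("\n".join(raw_lines[max(0, assert_i - 2):assert_i + 3]), limit=800)
--     if tb_i is not None:
--         return _markdown_cell("\n".join(raw_lines[tb_i:tb_i + 10]), limit=800)
--     if last_marker is not None:
--         return _markdown_cell(last_marker, limit=300)
--     if status == "passed":
--         return ""
--     return _markdown_cell(last_line if last_line is not None else status, limit=300)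
-- ===== Notes on version B (the rewrite author's own statement) =====
-- stated objective: alternative
-- what changed: A makes four separate scans over the lines (three forward enumerate loops plus a reversed loop over the filtered lines); B makes ONE forward pass that simultaneously records the first FAIL/ERROR index, first AssertionError index, first Traceback index, the last non-empty line and the last marker-bearing line, then applies the same precedence afterwards.
import Mathlib
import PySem

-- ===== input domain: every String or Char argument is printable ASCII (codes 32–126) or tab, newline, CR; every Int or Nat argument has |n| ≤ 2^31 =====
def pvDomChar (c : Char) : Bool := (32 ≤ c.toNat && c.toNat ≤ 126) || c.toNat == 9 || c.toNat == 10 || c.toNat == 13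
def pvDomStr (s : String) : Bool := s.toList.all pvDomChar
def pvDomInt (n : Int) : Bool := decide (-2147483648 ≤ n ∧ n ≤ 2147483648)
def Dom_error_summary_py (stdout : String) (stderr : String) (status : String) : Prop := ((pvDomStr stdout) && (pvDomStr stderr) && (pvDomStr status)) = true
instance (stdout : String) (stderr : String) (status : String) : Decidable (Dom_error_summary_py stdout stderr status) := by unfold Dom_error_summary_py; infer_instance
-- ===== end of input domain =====

-- B replaces A's four separate scans (three forward enumerate loops and a reversed
-- loop over the filtered lines) by ONE forward pass recording first/last hits, then
-- applies the same precedence; same cost class, different decomposition (objective: alternative).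

-- ===== PORT A =====
-- _markdown_cell (identical helper in both Pythons). 'value or ""' is 'value' for a
-- string unless empty, and _markdown_cell("") = "" either way, so it is just 'value'.
-- text[:limit-1] with limit ≥ 1 is List.take (limit-1) (PySem.List.slice_natCast).
def mdCell (v : List Char) (limit : Nat) : List Char :=
  let t := PySem.Chars.strip (PySem.Chars.replace (PySem.Chars.replace v ['\r'] [' ']) ['\n'] [' '])
  let t := PySem.Chars.replace t ['|'] ['\\', '|']
  if limit < t.length then PySem.Chars.rstrip (t.take (limit - 1)) ++ ['…'] else t

-- any(marker in line for marker in priority_markers)  (markers are a literal tuple in both Pythons)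
def hasMarker (l : List Char) : Bool :=
  PySem.Chars.isIn "TimeoutError".toList l || PySem.Chars.isIn "Error:".toList l ||
  PySem.Chars.isIn "FAIL".toList l || PySem.Chars.isIn "Traceback".toList l ||
  PySem.Chars.isIn "SMOKE_STATUS".toList l

-- A's first loop; raw[idx:idx+8] = (raw.drop idx).take 8 for a Nat index (PySem.List.slice_natCast_add, exact)
def aScan1 : List (List Char) → Nat → List (List Char) → Option (List Char)
  | [], _, _ => none
  | line :: rest, idx, raw =>
    let s := PySem.Chars.strip line
    if PySem.Chars.startswith s "FAIL: ".toList || PySem.Chars.startswith s "ERROR: ".toList then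
      some (mdCell (PySem.Chars.join ['\n'] ((raw.drop idx).take 8)) 800)
    else aScan1 rest (idx + 1) raw

-- A's second loop; raw[max(0,idx-2):idx+3] = (raw.drop (idx-2)).take (idx+3-(idx-2)) with Nat truncated subtraction (exact)
def aScan2 : List (List Char) → Nat → List (List Char) → Option (List Char)
  | [], _, _ => none
  | line :: rest, idx, raw =>
    if PySem.Chars.isIn "AssertionError".toList line then
      some (mdCell (PySem.Chars.join ['\n'] ((raw.drop (idx - 2)).take (idx + 3 - (idx - 2)))) 800)
    else aScan2 rest (idx + 1) raw

-- A's third loop; raw[idx:min(len,idx+10)] = (raw.drop idx).take 10 (take clamps, exact)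
def aScan3 : List (List Char) → Nat → List (List Char) → Option (List Char)
  | [], _, _ => none
  | line :: rest, idx, raw =>
    if PySem.Chars.startswith (PySem.Chars.strip line) "Traceback".toList then
      some (mdCell (PySem.Chars.join ['\n'] ((raw.drop idx).take 10)) 800)
    else aScan3 rest (idx + 1) raw

-- A's fourth loop, applied to combined_lines reversed
def aScan4 : List (List Char) → Option (List Char)
  | [] => none
  | line :: rest => if hasMarker line then some (mdCell line 300) else aScan4 rest

def error_summary_py (stdout : String) (stderr : String) (status : String) : String :=
  let raw := PySem.Chars.splitlines (stderr.toList ++ '\n' :: stdout.toList)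
  let combined := (raw.filter (fun l => !(PySem.Chars.strip l).isEmpty)).map PySem.Chars.rstrip
  match aScan1 raw 0 raw with
  | some r => String.ofList r
  | none =>
    match aScan2 raw 0 raw with
    | some r => String.ofList r
    | none =>
      match aScan3 raw 0 raw with
      | some r => String.ofList r
      | none =>
        match aScan4 combined.reverse with
        | some r => String.ofList r
        | none =>
          if status = "passed" then ""
          else String.ofList (mdCell (match combined.getLast? with
            | some l => l
            | none => status.toList) 300)

-- ===== PORT B =====
-- B's single pass: state (fail_i, assert_i, tb_i, last_marker, last_line)
def bLoop : List (List Char) → Nat →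
    (Option Nat × Option Nat × Option Nat × Option (List Char) × Option (List Char)) →
    (Option Nat × Option Nat × Option Nat × Option (List Char) × Option (List Char))
  | [], _, st => st
  | line :: rest, idx, (fI, aI, tI, mk, ll) =>
    let s := PySem.Chars.strip line
    let fI := if fI.isNone && (PySem.Chars.startswith s "FAIL: ".toList || PySem.Chars.startswith s "ERROR: ".toList) then some idx else fI
    let aI := if aI.isNone && PySem.Chars.isIn "AssertionError".toList line then some idx else aI
    let tI := if tI.isNone && PySem.Chars.startswith s "Traceback".toList then some idx else tI
    let st :=
      if !s.isEmpty then
        let r := PySem.Chars.rstrip line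
        (fI, aI, tI, if hasMarker r then some r else mk, some r)
      else (fI, aI, tI, mk, ll)
    bLoop rest (idx + 1) st

def error_summary_py_alt (stdout : String) (stderr : String) (status : String) : String :=
  let raw := PySem.Chars.splitlines (stderr.toList ++ '\n' :: stdout.toList)
  match bLoop raw 0 (none, none, none, none, none) with
  | (fI, aI, tI, mk, ll) =>
    match fI with
    | some i => String.ofList (mdCell (PySem.Chars.join ['\n'] ((raw.drop i).take 8)) 800)
    | none =>
      match aI with
      | some i => String.ofList (mdCell (PySem.Chars.join ['\n'] ((raw.drop (i - 2)).take (i + 3 - (i - 2)))) 800)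
      | none =>
        match tI with
        | some i => String.ofList (mdCell (PySem.Chars.join ['\n'] ((raw.drop i).take 10)) 800)
        | none =>
          match mk with
          | some r => String.ofList (mdCell r 300)
          | none =>
            if status = "passed" then ""
            else String.ofList (mdCell (match ll with
              | some l => l
              | none => status.toList) 300)

-- ===== PRECONDITION & SPEC =====
def Spec_error_summary_py (stdout : String) (stderr : String) (status : String) (out : String) : Prop := out = error_summary_py_alt stdout stderr status
instance (stdout : String) (stderr : String) (status : String) (out : String) : Decidable (Spec_error_summary_py stdout stderr status out) := by unfold Spec_error_summary_py; infer_instance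

-- ===== CLAIM (what is proved, stated in full; the proofs are below) =====
def Claim_equal_error_summary_py : Prop := ∀ (stdout : String) (stderr : String) (status : String), Dom_error_summary_py stdout stderr status → Spec_error_summary_py stdout stderr status (error_summary_py stdout stderr status)

-- ===== LEMMAS AND PROOFS =====

def p1 (l : List Char) : Bool :=
  PySem.Chars.startswith (PySem.Chars.strip l) "FAIL: ".toList || PySem.Chars.startswith (PySem.Chars.strip l) "ERROR: ".toList
def p2 (l : List Char) : Bool := PySem.Chars.isIn "AssertionError".toList l
def p3 (l : List Char) : Bool := PySem.Chars.startswith (PySem.Chars.strip l) "Traceback".toList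
def combinedOf (xs : List (List Char)) : List (List Char) :=
  (xs.filter (fun l => !(PySem.Chars.strip l).isEmpty)).map PySem.Chars.rstrip

theorem aScan1_eq (xs : List (List Char)) (idx : Nat) (raw : List (List Char)) :
    aScan1 xs idx raw = (xs.findIdx? p1).map
      (fun j => mdCell (PySem.Chars.join ['\n'] ((raw.drop (idx + j)).take 8)) 800) := by
  induction xs generalizing idx with
  | nil => simp [aScan1]
  | cons a rest ih =>
    rw [aScan1, List.findIdx?_cons]
    by_cases h : p1 a
    · simp [p1] at h; simp [p1, h]
    · rw [if_neg h]
      simp only [p1] at h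
      rw [if_neg h, ih, Option.map_map]
      cases rest.findIdx? p1 <;> simp [Nat.add_assoc, Nat.add_comm 1]

theorem aScan2_eq (xs : List (List Char)) (idx : Nat) (raw : List (List Char)) :
    aScan2 xs idx raw = (xs.findIdx? p2).map
      (fun j => mdCell (PySem.Chars.join ['\n'] ((raw.drop (idx + j - 2)).take (idx + j + 3 - (idx + j - 2)))) 800) := by
  induction xs generalizing idx with
  | nil => simp [aScan2]
  | cons a rest ih =>
    rw [aScan2, List.findIdx?_cons]
    by_cases h : p2 a
    · simp [p2] at h; simp [p2, h]
    · rw [if_neg h]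
      simp only [p2] at h
      rw [if_neg h, ih, Option.map_map]
      cases rest.findIdx? p2 <;> simp [Nat.add_assoc, Nat.add_comm 1]

theorem aScan3_eq (xs : List (List Char)) (idx : Nat) (raw : List (List Char)) :
    aScan3 xs idx raw = (xs.findIdx? p3).map
      (fun j => mdCell (PySem.Chars.join ['\n'] ((raw.drop (idx + j)).take 10)) 800) := by
  induction xs generalizing idx with
  | nil => simp [aScan3]
  | cons a rest ih =>
    rw [aScan3, List.findIdx?_cons]
    by_cases h : p3 a
    · simp [p3] at h; simp [p3, h]
    · rw [if_neg h]
      simp only [p3] at h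
      rw [if_neg h, ih, Option.map_map]
      cases rest.findIdx? p3 <;> simp [Nat.add_assoc, Nat.add_comm 1]

theorem aScan4_eq (ys : List (List Char)) :
    aScan4 ys = (ys.find? hasMarker).map (fun l => mdCell l 300) := by
  induction ys with
  | nil => simp [aScan4]
  | cons a rest ih =>
    rw [aScan4, List.find?_cons]
    by_cases h : hasMarker a <;> simp [h, ih]

theorem getLast?_cons_or (a : List Char) (l : List (List Char)) :
    (a :: l).getLast? = (l.getLast?).or (some a) := by
  cases l with
  | nil => simp
  | cons b t =>
    rw [List.getLast?_cons_cons]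
    obtain ⟨x, hx⟩ := Option.isSome_iff_exists.mp
      ((List.getLast?_isSome (l := b :: t)).mpr (by simp))
    simp [hx]

theorem merge_step (o : Option Nat) (c : Bool) (r : Option Nat) (idx : Nat) :
    ((if o.isNone && c then some idx else o).or (r.map (· + (idx + 1)))) =
      o.or ((if c then some 0 else r.map (· + 1)).map (· + idx)) := by
  cases o <;> cases c <;> cases r <;> simp [Nat.add_assoc, Nat.add_comm 1]

theorem bLoop_eq (xs : List (List Char)) (idx : Nat)
    (fI aI tI : Option Nat) (mk ll : Option (List Char)) :
    bLoop xs idx (fI, aI, tI, mk, ll) =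
      (fI.or ((xs.findIdx? p1).map (· + idx)),
       aI.or ((xs.findIdx? p2).map (· + idx)),
       tI.or ((xs.findIdx? p3).map (· + idx)),
       ((combinedOf xs).reverse.find? hasMarker).or mk,
       ((combinedOf xs).getLast?).or ll) := by
  induction xs generalizing idx fI aI tI mk ll with
  | nil => simp [bLoop, combinedOf]
  | cons a rest ih =>
    by_cases hs : (PySem.Chars.strip a).isEmpty
    · have hcomb : combinedOf (a :: rest) = combinedOf rest := by
        simp [combinedOf, hs]
      simp only [bLoop, hs, Bool.not_true, Bool.false_eq_true, if_false]
      rw [ih, hcomb, List.findIdx?_cons, List.findIdx?_cons, List.findIdx?_cons]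
      simp only [p1, p2, p3, Prod.mk.injEq]
      exact ⟨merge_step _ _ _ _, merge_step _ _ _ _, merge_step _ _ _ _, trivial⟩
    · have hcomb : combinedOf (a :: rest) = PySem.Chars.rstrip a :: combinedOf rest := by
        simp [combinedOf, hs]
      simp only [bLoop, hs, Bool.not_false, if_true]
      rw [ih, hcomb, List.findIdx?_cons, List.findIdx?_cons, List.findIdx?_cons,
        getLast?_cons_or]
      simp only [p1, p2, p3, Prod.mk.injEq]
      refine ⟨merge_step _ _ _ _, merge_step _ _ _ _, merge_step _ _ _ _, ?_, ?_⟩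
      · rw [List.reverse_cons, List.find?_append, Option.or_assoc]
        cases hM : hasMarker (PySem.Chars.rstrip a) <;> simp [hM]
      · rw [Option.or_assoc]
        simp

-- ===== VERDICT (by name: the statement is the Claim_ definition above) =====
theorem error_summary_py_spec : Claim_equal_error_summary_py := by
  intro stdout stderr status _
  unfold Spec_error_summary_py
  simp only [error_summary_py, error_summary_py_alt]
  rw [bLoop_eq]
  set raw := PySem.Chars.splitlines (stderr.toList ++ '\n' :: stdout.toList) with hraw
  rw [aScan1_eq raw 0 raw, aScan2_eq raw 0 raw, aScan3_eq raw 0 raw, aScan4_eq]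
  simp only [Option.or_none, Option.none_or, Nat.zero_add, Nat.add_zero]
  rw [show List.map PySem.Chars.rstrip (List.filter (fun l => !(PySem.Chars.strip l).isEmpty) raw)
        = combinedOf raw from rfl]
  cases h1 : raw.findIdx? p1 with
  | some i => simp
  | none =>
    cases h2 : raw.findIdx? p2 with
    | some i => simp
    | none =>
      cases h3 : raw.findIdx? p3 with
      | some i => simp
      | none =>
        simp only [Option.map_none]
        cases h4 : (combinedOf raw).reverse.find? hasMarker with
        | some r => simp
        | none => simp
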